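-- pv_equiv track=rewrite | github.com/Constakour/q5-automorphism-analysis | scripts/verify_witness.py | apply_affine_to_mask
-- ===== SOURCE A (Python) =====
-- N = 5
--
-- def apply_perm_to_vertex(v: int, perm):
--     """
--     perm[i] means: new bit i gets old bit perm[i]
--     i.e. (P v)_i = v_{perm[i]} with LSB indexing.
--     """
--     out = 0
--     for i in range(N):
--         bit = (v >> perm[i]) & 1
--         out |= (bit << i)
--     return out
--
-- def apply_affine_to_mask(mask: int, perm, c: int) -> int:
--     res = 0
--     mm = mask
--     while mm:
--         lsb = mm & -mm
--         v = (lsb.bit_length() - 1)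
--         img = apply_perm_to_vertex(v, perm) ^ c
--         res |= (1 << img)
--         mm ^= lsb
--     return res & 0xFFFFFFFF
-- ===== SOURCE B (Python) =====
-- N = 5
--
-- def apply_affine_to_mask(mask: int, perm, c: int) -> int:
--     # Empty gather: no set bits, nothing to map.
--     if not mask:
--         return 0
--     # Precompute the image bit position for every 5-bit vertex once,
--     # then gather over the set bits of mask by scanning positions LSB-first.
--     table = [sum(((w >> p) & 1) << i for i, p in enumerate(perm[:N])) ^ c
--              for w in range(32)]
--     res = 0
--     m = mask
--     pos = 0
--     while m:
--         if m & 1: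
--             res |= 1 << table[pos & 31]
--         m >>= 1
--         pos += 1
--     return res & 0xFFFFFFFF
-- ===== Notes on version B (the rewrite author's own statement) =====
-- stated objective: alternative
-- what changed: B precomputes a 32-entry lookup table of image bit positions once (after an early return for an empty mask), then gathers over mask by a low-bit shift scan (m&1 / m>>=1 with a position counter), instead of A's per-set-bit lsb-isolation (mm&-mm, bit_length) with the 5-bit permutation recomputed inside the loop.
import Mathlib
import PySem

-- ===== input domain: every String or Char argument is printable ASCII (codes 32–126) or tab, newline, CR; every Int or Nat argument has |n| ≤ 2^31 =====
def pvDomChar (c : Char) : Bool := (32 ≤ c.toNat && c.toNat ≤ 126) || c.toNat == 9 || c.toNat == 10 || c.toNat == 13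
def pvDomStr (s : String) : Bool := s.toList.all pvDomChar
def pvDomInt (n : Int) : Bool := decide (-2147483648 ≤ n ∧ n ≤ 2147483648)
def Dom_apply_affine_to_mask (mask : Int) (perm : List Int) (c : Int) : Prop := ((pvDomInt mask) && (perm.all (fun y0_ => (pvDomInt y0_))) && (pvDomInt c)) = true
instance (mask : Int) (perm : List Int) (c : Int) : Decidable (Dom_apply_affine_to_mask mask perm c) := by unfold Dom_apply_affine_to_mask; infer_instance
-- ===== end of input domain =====

-- B replaces A's per-set-bit lsb-isolation (mm & -mm, bit_length, permutation recomputed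
-- in the loop) by an early return for an empty mask, then a 32-entry table built once
-- plus a low-bit shift scan of mask (alternative decomposition, similar cost).

-- ===== PORT A =====
-- out = 0; for i in range(5): bit = (v >> perm[i]) & 1; out |= bit << i
-- Shift counts are `.toNat` of values that are nonnegative on every input Pre_ admits
-- (Python raises ValueError on a negative shift count); perm[i] is pyGetD (the IndexError
-- case is excluded by Pre_), so the port is Python-exact on Pre_.
def apply_perm_to_vertex (v : Int) (perm : List Int) : Int :=
  (PySem.List.pyRange 0 5 1).foldl
    (fun out i =>
      let bit := PySem.Int.band (v >>> (PySem.List.pyGetD perm i 0).toNat) 1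
      PySem.Int.bor out (bit <<< i.toNat)) 0

-- `while mm:` with mm ^= lsb each round: mm.toNat strictly decreases, so fuel
-- mask.toNat + 1 never runs out on the inputs Pre_ admits (0 ≤ mask).
def pvLoopA : Nat → Int → List Int → Int → Int → Int
  | 0, _, _, _, res => res
  | fuel + 1, mm, perm, c, res =>
    if mm = 0 then res
    else
      let lsb := PySem.Int.band mm (-mm)
      let v : Int := (PySem.Int.bitLength lsb : Int) - 1
      let img := PySem.Int.bxor (apply_perm_to_vertex v perm) c
      pvLoopA fuel (PySem.Int.bxor mm lsb) perm c (PySem.Int.bor res (1 <<< img.toNat))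

def apply_affine_to_mask (mask : Int) (perm : List Int) (c : Int) : Int :=
  PySem.Int.band (pvLoopA (mask.toNat + 1) mask perm c 0) 4294967295

-- ===== PORT B =====
-- one term ((w >> p) & 1) << i of B's generator expression (i = ip.1 is 0..4, so .toNat is exact)
def pvTerm (w : Int) (ip : Int × Int) : Int :=
  PySem.Int.band (w >>> ip.2.toNat) 1 <<< ip.1.toNat

-- sum(((w >> p) & 1) << i for i, p in enumerate(perm[:5])) ^ c
def pvImage (w : Int) (perm : List Int) (c : Int) : Int :=
  PySem.Int.bxor (((PySem.List.enumerate (perm.take 5) 0).map (pvTerm w)).sum) c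

-- table = [pvImage w perm c for w in range(32)]
def pvTable (perm : List Int) (c : Int) : List Int :=
  (List.range 32).map (fun w => pvImage (w : Int) perm c)

-- while m: if m & 1: res |= 1 << table[pos & 31]; m >>= 1; pos += 1
-- table[pos & 31] is always in range (length 32), so List.getD is Python-exact here;
-- fuel mask.toNat + 1 suffices since m.toNat strictly decreases on 0 ≤ mask.
def pvLoopB : Nat → Int → List Int → Nat → Int → Int
  | 0, _, _, _, res => res
  | fuel + 1, m, table, pos, res =>
    if m = 0 then res
    else
      let res' := if PySem.Int.band m 1 ≠ 0 then
          PySem.Int.bor res (1 <<< (table.getD (pos &&& 31) 0).toNat)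
        else res
      pvLoopB fuel (m >>> (1:Nat)) table (pos + 1) res'

-- if not mask: return 0; then the table build and the gather loop
def apply_affine_to_mask_alt (mask : Int) (perm : List Int) (c : Int) : Int :=
  if mask = 0 then 0
  else PySem.Int.band (pvLoopB (mask.toNat + 1) mask (pvTable perm c) 0 0) 4294967295

-- ===== PRECONDITION & SPEC =====
-- Exactly where Python A returns: mask < 0 makes A loop forever (`while mm` with mm ^= lsb
-- stays negative); for mask ≠ 0, fewer than 5 perm entries is an IndexError, a negative
-- entry among the first five a ValueError (negative shift count), and a negative c a
-- ValueError (negative shift count in 1 << img). For mask = 0 both programs return 0 for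
-- every perm and c, so nothing there is excluded.
def Pre_apply_affine_to_mask (mask : Int) (perm : List Int) (c : Int) : Prop :=
  0 ≤ mask ∧ (mask ≠ 0 → (∀ p ∈ perm.take 5, 0 ≤ p) ∧ 5 ≤ perm.length ∧ 0 ≤ c)
instance (mask : Int) (perm : List Int) (c : Int) : Decidable (Pre_apply_affine_to_mask mask perm c) := by unfold Pre_apply_affine_to_mask; infer_instance

def pvWitness_apply_affine_to_mask : Int × List Int × Int := (21, [1, 0, 2, 4, 3], 5)

def Spec_apply_affine_to_mask (mask : Int) (perm : List Int) (c : Int) (out : Int) : Prop := out = apply_affine_to_mask_alt mask perm c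
instance (mask : Int) (perm : List Int) (c : Int) (out : Int) : Decidable (Spec_apply_affine_to_mask mask perm c out) := by unfold Spec_apply_affine_to_mask; infer_instance

-- ===== CLAIM (what is proved, stated in full; the proofs are below) =====
def Claim_equal_apply_affine_to_mask : Prop := ∀ (mask : Int) (perm : List Int) (c : Int), Dom_apply_affine_to_mask mask perm c → Pre_apply_affine_to_mask mask perm c → Spec_apply_affine_to_mask mask perm c (apply_affine_to_mask mask perm c)

-- ===== LEMMAS AND PROOFS =====
theorem nat_and_halves (a b : Nat) : a &&& b = 2 * (a / 2 &&& b / 2) + (a % 2 &&& b % 2) := by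
  have e : (a % 2 &&& b % 2) ≤ 1 := by
    rcases Nat.mod_two_eq_zero_or_one a with h|h <;> rcases Nat.mod_two_eq_zero_or_one b with h'|h' <;>
      simp [h, h']
  apply Nat.eq_of_testBit_eq
  intro i
  cases i with
  | zero =>
    simp only [Nat.testBit_zero]
    rcases Nat.mod_two_eq_zero_or_one a with h|h <;> rcases Nat.mod_two_eq_zero_or_one b with h'|h' <;>
      simp [h, h']
  | succ i =>
    have h2 : (2 * (a / 2 &&& b / 2) + (a % 2 &&& b % 2)) / 2 = (a / 2 &&& b / 2) := by omega
    rw [Nat.testBit_and, Nat.testBit_succ, Nat.testBit_succ, Nat.testBit_succ, h2, Nat.testBit_and]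

theorem nat_xor_halves (a b : Nat) : a ^^^ b = 2 * (a / 2 ^^^ b / 2) + (a % 2 ^^^ b % 2) := by
  have e : (a % 2 ^^^ b % 2) ≤ 1 := by
    rcases Nat.mod_two_eq_zero_or_one a with h|h <;> rcases Nat.mod_two_eq_zero_or_one b with h'|h' <;>
      simp [h, h']
  apply Nat.eq_of_testBit_eq
  intro i
  cases i with
  | zero =>
    simp only [Nat.testBit_zero]
    rcases Nat.mod_two_eq_zero_or_one a with h|h <;> rcases Nat.mod_two_eq_zero_or_one b with h'|h' <;>
      simp [h, h'] <;> omega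
  | succ i =>
    have h2 : (2 * (a / 2 ^^^ b / 2) + (a % 2 ^^^ b % 2)) / 2 = (a / 2 ^^^ b / 2) := by omega
    rw [Nat.testBit_xor, Nat.testBit_succ, Nat.testBit_succ, Nat.testBit_succ, h2, Nat.testBit_xor]

def pvTz (n : Nat) : Nat :=
  if n % 2 = 1 ∨ n = 0 then 0 else pvTz (n / 2) + 1
decreasing_by omega

theorem pvTz_odd (n : Nat) (h : n % 2 = 1) : pvTz n = 0 := by rw [pvTz]; simp [h]

theorem pvTz_even (n : Nat) (h : n % 2 = 0) (h0 : n ≠ 0) : pvTz n = pvTz (n / 2) + 1 := by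
  rw [pvTz]; simp [h, h0]

theorem pvTz_pow_le (n : Nat) (h : 0 < n) : 2 ^ pvTz n ≤ n := by
  induction n using Nat.strong_induction_on with
  | _ n ih =>
    rcases Nat.mod_two_eq_zero_or_one n with hp | hp
    · rw [pvTz_even n hp (by omega)]
      have := ih (n / 2) (by omega) (by omega)
      rw [pow_succ]
      omega
    · rw [pvTz_odd n hp]; omega

theorem and_pred_eq (n : Nat) (h : 0 < n) : n &&& (n - 1) = n - 2 ^ pvTz n := by
  induction n using Nat.strong_induction_on with
  | _ n ih =>
    rcases Nat.mod_two_eq_zero_or_one n with hp | hp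
    · rw [pvTz_even n hp (by omega)]
      have h1 : (n - 1) / 2 = n / 2 - 1 := by omega
      have h2 : (n - 1) % 2 = 1 := by omega
      rw [nat_and_halves, h1, h2, hp, ih (n / 2) (by omega) (by omega)]
      have h3 := pvTz_pow_le (n / 2) (by omega)
      simp [pow_succ]
      omega
    · rw [pvTz_odd n hp]
      have h1 : (n - 1) / 2 = n / 2 := by omega
      have h2 : (n - 1) % 2 = 0 := by omega
      rw [nat_and_halves, h1, h2, hp, Nat.and_self]
      simp
      omega

theorem xor_lsb_eq (n : Nat) (h : 0 < n) : n ^^^ 2 ^ pvTz n = n - 2 ^ pvTz n := by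
  induction n using Nat.strong_induction_on with
  | _ n ih =>
    rcases Nat.mod_two_eq_zero_or_one n with hp | hp
    · rw [pvTz_even n hp (by omega)]
      have h1 : 2 ^ (pvTz (n / 2) + 1) / 2 = 2 ^ pvTz (n / 2) := by rw [pow_succ]; omega
      have h2 : 2 ^ (pvTz (n / 2) + 1) % 2 = 0 := by rw [pow_succ]; omega
      rw [nat_xor_halves, h1, h2, hp, ih (n / 2) (by omega) (by omega)]
      have h3 := pvTz_pow_le (n / 2) (by omega)
      simp [pow_succ]
      omega
    · rw [pvTz_odd n hp]
      have h1 : 2 ^ (0:Nat) = 1 := by norm_num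
      rw [h1, nat_xor_halves, hp]
      norm_num
      omega

theorem bitLength_pow (t : Nat) : PySem.Int.bitLength ((2 ^ t : Nat) : Int) = t + 1 := by
  induction t with
  | zero => norm_num; decide
  | succ t ih =>
    rw [PySem.Int.bitLength_natCast (m := 2 ^ (t+1)) (by positivity)]
    have : 2 ^ (t + 1) / 2 = 2 ^ t := by rw [pow_succ]; omega
    rw [this, ih]

theorem band_neg_self (n : Nat) (h : 0 < n) :
    PySem.Int.band (n : Int) (-(n : Int)) = ((2 ^ pvTz n : Nat) : Int) := by
  have h1 : (0:Int) ≤ (n:Int) := by positivity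
  have h2 : ¬ (0:Int) ≤ -(n:Int) := by omega
  simp only [PySem.Int.band, if_pos h1, if_neg h2]
  have h3 : (-(-(n:Int)) - 1).toNat = n - 1 := by omega
  have h4 : ((n:Int)).toNat = n := by omega
  rw [h3, h4, and_pred_eq n h]
  rw [Nat.sub_sub_self (pvTz_pow_le n h)]

def pvBitN (perm : List Int) (c : Int) (pos : Nat) : Nat :=
  1 <<< (PySem.Int.bxor (apply_perm_to_vertex (pos : Int) perm) c).toNat

def pvF (perm : List Int) (c : Int) (n pos : Nat) : Nat :=
  if n = 0 then 0
  else if n % 2 = 1 then pvBitN perm c pos ||| pvF perm c (n / 2) (pos + 1)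
  else pvF perm c (n / 2) (pos + 1)
decreasing_by all_goals omega

theorem pvF_zero (perm : List Int) (c : Int) (pos : Nat) : pvF perm c 0 pos = 0 := by
  rw [pvF]; simp

theorem pvF_split (perm : List Int) (c : Int) (n : Nat) (h : 0 < n) : ∀ pos,
    pvF perm c n pos = pvBitN perm c (pos + pvTz n) ||| pvF perm c (n - 2 ^ pvTz n) pos := by
  induction n using Nat.strong_induction_on with
  | _ n ih =>
    intro pos
    rcases Nat.mod_two_eq_zero_or_one n with hp | hp
    · -- even
      have h2 : n / 2 ≠ 0 := by omega
      rw [pvTz_even n hp (by omega)]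
      have hpow : 2 ^ (pvTz (n / 2) + 1) = 2 * 2 ^ pvTz (n / 2) := by rw [pow_succ]; ring
      have hle := pvTz_pow_le (n / 2) (by omega)
      rw [pvF, if_neg (by omega), if_neg (by omega)]
      rw [ih (n / 2) (by omega) (by omega) (pos + 1)]
      by_cases hz : n - 2 ^ (pvTz (n / 2) + 1) = 0
      · have hz2 : n / 2 - 2 ^ pvTz (n / 2) = 0 := by omega
        rw [hz, hz2, pvF_zero, pvF_zero]
        have : pos + 1 + pvTz (n / 2) = pos + (pvTz (n / 2) + 1) := by omega
        rw [this]
      · rw [show pvF perm c (n - 2 ^ (pvTz (n / 2) + 1)) pos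
              = pvF perm c ((n - 2 ^ (pvTz (n / 2) + 1)) / 2) (pos + 1) from by
            rw [pvF, if_neg hz, if_neg (by omega)]]
        have harg : (n - 2 ^ (pvTz (n / 2) + 1)) / 2 = n / 2 - 2 ^ pvTz (n / 2) := by omega
        rw [harg]
        have : pos + 1 + pvTz (n / 2) = pos + (pvTz (n / 2) + 1) := by omega
        rw [this]
    · -- odd
      rw [pvTz_odd n hp]
      simp only [pow_zero, Nat.add_zero]
      rw [pvF, if_neg (by omega), if_pos hp]
      by_cases h1 : n = 1
      · subst h1
        norm_num [pvF_zero]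
      · rw [show pvF perm c (n - 1) pos = pvF perm c ((n - 1) / 2) (pos + 1) from by
            rw [pvF, if_neg (by omega), if_neg (by omega)]]
        have : (n - 1) / 2 = n / 2 := by omega
        rw [this]

theorem band_one_cases (a : Int) : PySem.Int.band a 1 = 0 ∨ PySem.Int.band a 1 = 1 := by
  rw [PySem.Int.band_one]; exact PySem.Int.mod_two_eq a

theorem img_eq (perm : List Int) (hlen : 5 ≤ perm.length) (v : Int) (c : Int) :
    pvImage v perm c = PySem.Int.bxor (apply_perm_to_vertex v perm) c := by
  rcases perm with _ | ⟨p0, _ | ⟨p1, _ | ⟨p2, _ | ⟨p3, _ | ⟨p4, rest⟩⟩⟩⟩⟩ <;>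
    simp only [List.length] at hlen <;> try omega
  unfold pvImage apply_perm_to_vertex pvTerm
  rw [show PySem.List.pyRange 0 5 1 = [0, 1, 2, 3, 4] from by decide]
  simp only [List.take, PySem.List.enumerate_cons, PySem.List.enumerate_nil, List.map,
    List.foldl, List.sum_cons, List.sum_nil,
    PySem.List.pyGetD_ofNat', List.getD,
    List.getElem?_cons_zero, List.getElem?_cons_succ, Option.getD_some]
  congr 1
  rcases band_one_cases (v >>> p0.toNat) with h0 | h0 <;>
  rcases band_one_cases (v >>> p1.toNat) with h1 | h1 <;>
  rcases band_one_cases (v >>> p2.toNat) with h2 | h2 <;>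
  rcases band_one_cases (v >>> p3.toNat) with h3 | h3 <;>
  rcases band_one_cases (v >>> p4.toNat) with h4 | h4 <;>
    rw [h0, h1, h2, h3, h4] <;> decide

theorem table_getD (perm : List Int) (c : Int) (pos : Nat) (h : pos < 32) :
    (pvTable perm c).getD pos 0 = pvImage (pos : Int) perm c :=
  PySem.List.getD_map_range (fun w => pvImage (w : Int) perm c) 32 pos 0 h

theorem and31 (pos : Nat) (h : pos ≤ 31) : pos &&& 31 = pos := by
  interval_cases pos <;> rfl

theorem loopA_eq (perm : List Int) (c : Int) (fuel n r : Nat) (hf : n ≤ fuel) :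
    pvLoopA fuel (n : Int) perm c (r : Int) = ((r ||| pvF perm c n 0 : Nat) : Int) := by
  induction fuel generalizing n r with
  | zero =>
    have : n = 0 := by omega
    subst this
    simp [pvLoopA, pvF_zero]
  | succ fuel ih =>
    by_cases h0 : n = 0
    · subst h0; simp [pvLoopA, pvF_zero]
    · have hn : 0 < n := by omega
      have hle := pvTz_pow_le n hn
      have hpow : 0 < 2 ^ pvTz n := by positivity
      rw [pvLoopA]
      rw [if_neg (by exact_mod_cast h0)]
      simp only [band_neg_self n hn, bitLength_pow, PySem.Int.bxor_natCast, xor_lsb_eq n hn]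
      have hvt : ((pvTz n + 1 : Nat) : Int) - 1 = ((pvTz n : Nat) : Int) := by push_cast; ring
      rw [hvt, PySem.Int.bor_natCast]
      rw [ih (n - 2 ^ pvTz n) _ (by omega)]
      rw [Nat.lor_assoc]
      congr 2
      rw [pvF_split perm c n hn 0]
      simp [pvBitN]

theorem loopB_eq (perm : List Int) (c : Int) (hlen : 5 ≤ perm.length)
    (fuel n pos r : Nat) (hf : n ≤ fuel) (hb : n * 2 ^ pos ≤ 2 ^ 31) :
    pvLoopB fuel (n : Int) (pvTable perm c) pos (r : Int) = ((r ||| pvF perm c n pos : Nat) : Int) := by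
  induction fuel generalizing n pos r with
  | zero =>
    have : n = 0 := by omega
    subst this
    simp [pvLoopB, pvF_zero]
  | succ fuel ih =>
    by_cases h0 : n = 0
    · subst h0; simp [pvLoopB, pvF_zero]
    · have hn : 0 < n := by omega
      have hpos : pos ≤ 31 := by
        by_contra hc
        have h32 : (32:Nat) ≤ pos := by omega
        have : (2:Nat) ^ 32 ≤ 2 ^ pos := Nat.pow_le_pow_right (by omega) h32
        have : (2:Nat) ^ 32 ≤ n * 2 ^ pos := le_trans this (Nat.le_mul_of_pos_left _ hn)
        norm_num [Nat.pow_succ] at this hb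
        omega
      have hmod : PySem.Int.band (n : Int) 1 = ((n % 2 : Nat) : Int) := by
        rw [PySem.Int.band_one]
        exact_mod_cast PySem.Int.mod_natCast n 2
      have hshift : ((n : Int) >>> (1 : Nat)) = ((n / 2 : Nat) : Int) := by
        rw [show ((n : Int) >>> (1:Nat)) = ((n >>> 1 : Nat) : Int) from rfl, Nat.shiftRight_one]
      have hhalf : n / 2 * 2 ^ (pos + 1) ≤ 2 ^ 31 := by
        have h1 : n / 2 * 2 ^ (pos + 1) = (n / 2 * 2) * 2 ^ pos := by rw [pow_succ]; ring
        have h2 : n / 2 * 2 ≤ n := by omega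
        rw [h1]
        exact le_trans (Nat.mul_le_mul_right _ h2) hb
      rw [pvLoopB]
      rw [if_neg (by exact_mod_cast h0)]
      simp only [hmod, hshift, and31 pos hpos,
        table_getD perm c pos (by omega), img_eq perm hlen]
      rcases Nat.mod_two_eq_zero_or_one n with hp | hp
      · rw [if_neg (by rw [hp]; simp)]
        rw [ih (n / 2) (pos + 1) r (by omega) hhalf]
        congr 1
        conv_rhs => rw [pvF, if_neg h0, if_neg (by omega)]
      · rw [if_pos (by rw [hp]; simp)]
        rw [PySem.Int.bor_natCast]
        rw [ih (n / 2) (pos + 1) _ (by omega) hhalf]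
        rw [Nat.lor_assoc]
        congr 2
        conv_rhs => rw [pvF, if_neg h0, if_pos hp]
        rfl

-- ===== VERDICT (by name: the statement is the Claim_ definition above) =====
theorem apply_affine_to_mask_spec : Claim_equal_apply_affine_to_mask := by
  intro mask perm c hdom hpre
  unfold Spec_apply_affine_to_mask
  obtain ⟨hm0, hrest⟩ := hpre
  by_cases hz : mask = 0
  · subst hz
    simp [apply_affine_to_mask, apply_affine_to_mask_alt, pvLoopA]
    decide
  · obtain ⟨-, hlen, -⟩ := hrest hz
    have hmask : mask = ((mask.toNat : Nat) : Int) := (Int.toNat_of_nonneg hm0).symm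
    have hle : mask.toNat ≤ 2 ^ 31 := by
      have : mask ≤ 2147483648 := by
        unfold Dom_apply_affine_to_mask at hdom
        simp [pvDomInt] at hdom
        exact hdom.1.1.2
      omega
    rw [apply_affine_to_mask, apply_affine_to_mask_alt, if_neg hz, hmask]
    rw [show ((0:Int)) = ((0:Nat):Int) from rfl]
    rw [loopA_eq perm c _ _ _ (by omega),
        loopB_eq perm c hlen _ _ _ _ (by omega) (by simpa using hle)]
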